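/- GENERATED by farm/mkstatement.py from design/units.split.tsv — do not edit.
   THE SPLIT of the proof unit `start_decoder.C11` into `start_decoder.C11a`, `start_decoder.C11b`, `start_decoder.C11c`, `start_decoder.C11d`, `start_decoder.C11e`, `start_decoder.C11f`, `start_decoder.C11g`: the children's statements give the parent's
   UNCHANGED statement (so nothing above the parent — callers, compositions — is touched by the split). -/
import Vorbis.Spec.StartDecoderC11
import Vorbis.Spec.Units.start_decoder_C11
import Vorbis.Spec.Units.start_decoder_C11a
import Vorbis.Spec.Units.start_decoder_C11b
import Vorbis.Spec.Units.start_decoder_C11c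
import Vorbis.Spec.Units.start_decoder_C11d
import Vorbis.Spec.Units.start_decoder_C11e
import Vorbis.Spec.Units.start_decoder_C11f
import Vorbis.Spec.Units.start_decoder_C11g
namespace Vorbis.Spec.Splits
open X86 X86.User Asan

/-- The children of the split unit `start_decoder.C11` prove it, by `Vorbis.Spec.StartDecoder.SegC11.of_parts`. -/
theorem start_decoder_C11
    (h_start_decoder_C11a : Vorbis.Spec.start_decoder_C11a.Statement)
    (h_start_decoder_C11b : Vorbis.Spec.start_decoder_C11b.Statement)
    (h_start_decoder_C11c : Vorbis.Spec.start_decoder_C11c.Statement)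
    (h_start_decoder_C11d : Vorbis.Spec.start_decoder_C11d.Statement)
    (h_start_decoder_C11e : Vorbis.Spec.start_decoder_C11e.Statement)
    (h_start_decoder_C11f : Vorbis.Spec.start_decoder_C11f.Statement)
    (h_start_decoder_C11g : Vorbis.Spec.start_decoder_C11g.Statement) :
    Vorbis.Spec.start_decoder_C11.Statement := by
  intro Lay _hLay μ _hμ u₀ _hcode _h_get_bits _h_float32_unpack _h_asan_store4_noabort _h_asan_store1_noabort _h_asan_load1_noabort _h_asan_load4_noabort _h_setup_temp_malloc _h_asan_store2_noabort _h_lookup1_values _h_error _h_setup_temp_free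
  apply Vorbis.Spec.StartDecoder.SegC11.of_parts
  · exact h_start_decoder_C11a Lay _hLay μ _hμ u₀ _hcode _h_get_bits _h_float32_unpack _h_asan_store4_noabort
  · exact h_start_decoder_C11b Lay _hLay μ _hμ u₀ _hcode _h_get_bits _h_float32_unpack _h_asan_store4_noabort _h_asan_store1_noabort
  · exact h_start_decoder_C11c Lay _hLay μ _hμ u₀ _hcode _h_asan_store4_noabort _h_asan_store1_noabort _h_asan_load1_noabort _h_asan_load4_noabort _h_lookup1_values
  · exact h_start_decoder_C11d Lay _hLay μ _hμ u₀ _hcode _h_asan_store4_noabort _h_asan_load4_noabort _h_error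
  · exact h_start_decoder_C11e Lay _hLay μ _hμ u₀ _hcode _h_asan_load4_noabort _h_setup_temp_malloc _h_error
  · exact h_start_decoder_C11f Lay _hLay μ _hμ u₀ _hcode _h_get_bits _h_asan_load1_noabort _h_asan_load4_noabort
  · exact h_start_decoder_C11g Lay _hLay μ _hμ u₀ _hcode _h_asan_load4_noabort _h_asan_store2_noabort _h_error _h_setup_temp_free

end Vorbis.Spec.Splits
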